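-- pv_equiv track=rewrite | github.com/tormach/example_robot_programs | trpl_examples/projects/desktop_image_path_extractor/drawer_ROBO_JSON.py | divco
-- ===== SOURCE A (Python) =====
-- NUM_BATCH_LENGTH = 5  # Maximum number of paths in each batch
--
-- def divco(list):
--     if len(list) <= NUM_BATCH_LENGTH:
--         return [list]
--     else:
--         mid = len(list) // 2
--         left = list[:mid]
--         right = list[mid:]
--         return divco(left) + divco(right)
-- ===== SOURCE B (Python) =====
-- NUM_BATCH_LENGTH = 5
--
-- def divco(list):
--     # Iteratively compute the final chunk sizes (left-to-right via a stack
--     # of pending segment lengths), then slice the list once per chunk.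
--     sizes = []
--     stack = [len(list)]
--     while stack:
--         n = stack.pop()
--         if n <= NUM_BATCH_LENGTH:
--             sizes.append(n)
--         else:
--             m = n // 2
--             stack.append(n - m)
--             stack.append(m)
--     out = []
--     i = 0
--     for s in sizes:
--         out.append(list[i:i + s])
--         i += s
--     return out
-- ===== Notes on version B (the rewrite author's own statement) =====
-- stated objective: alternative
-- what changed: Replaces the recursive halving (which re-slices both halves at every level) by an iterative stack simulation over segment LENGTHS only, then slices each final chunk from the original list exactly once.
import Mathlib
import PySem

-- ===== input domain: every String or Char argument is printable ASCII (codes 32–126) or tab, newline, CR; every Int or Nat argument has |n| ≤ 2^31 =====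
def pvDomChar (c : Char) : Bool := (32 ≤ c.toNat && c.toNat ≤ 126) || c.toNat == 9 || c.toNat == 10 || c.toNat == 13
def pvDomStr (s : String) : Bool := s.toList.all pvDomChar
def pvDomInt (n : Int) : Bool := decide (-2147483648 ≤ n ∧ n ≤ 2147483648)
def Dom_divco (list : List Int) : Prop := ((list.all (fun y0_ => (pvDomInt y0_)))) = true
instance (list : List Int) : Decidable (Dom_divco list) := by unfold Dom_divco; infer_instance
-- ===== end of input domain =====

-- B replaces the recursive halving (which re-slices at every level) by an iterative
-- stack simulation over segment lengths, slicing each final chunk once (alternative algorithm).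


-- ===== PORT A =====
def divco (list : List Int) : List (List Int) :=
  if list.length ≤ 5 then [list]
  else
    let mid : Int := PySem.Int.floordiv (list.length : Int) 2
    let left := PySem.List.slice list none (some mid)
    let right := PySem.List.slice list (some mid) none
    divco left ++ divco right
termination_by list.length
decreasing_by
  · have h2 : PySem.Int.floordiv (list.length : Int) 2 = ((list.length / 2 : Nat) : Int) := by
      exact_mod_cast PySem.Int.floordiv_natCast list.length 2
    simp only [h2, PySem.List.slice_to_natCast, List.length_take]
    omega
  · have h2 : PySem.Int.floordiv (list.length : Int) 2 = ((list.length / 2 : Nat) : Int) := by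
      exact_mod_cast PySem.Int.floordiv_natCast list.length 2
    simp only [h2, PySem.List.slice_from_natCast, List.length_drop]
    omega

-- ===== PORT B =====
-- while stack: pop n; if n <= 5 collect it as a final size, else push the two halves
def sizesLoop (stack : List Int) (sizes : List Int) : List Int :=
  match stack with
  | [] => sizes
  | n :: rest =>
    if n ≤ 5 then sizesLoop rest (sizes ++ [n])
    else
      let m := PySem.Int.floordiv n 2
      sizesLoop (m :: (n - m) :: rest) sizes
termination_by (stack.map (fun n => 4 * n.toNat - 3)).sum + stack.length
decreasing_by
  · simp only [List.map_cons, List.sum_cons, List.length_cons]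
    omega
  · rename_i h
    have hpos : (0:Int) < 2 := by omega
    have h2 : PySem.Int.floordiv n 2 = n / 2 := PySem.Int.floordiv_eq_ediv_of_pos hpos
    simp only [h2, List.map_cons, List.sum_cons, List.length_cons]
    omega

def divco_alt (list : List Int) : List (List Int) :=
  let sizes := sizesLoop [(list.length : Int)] []
  (sizes.foldl
    (fun (st : List (List Int) × Int) s =>
      (st.1 ++ [PySem.List.slice list (some st.2) (some (st.2 + s))], st.2 + s))
    ([], 0)).1

-- ===== PRECONDITION & SPEC =====
def Spec_divco (list : List Int) (out : List (List Int)) : Prop := out = divco_alt list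
instance (list : List Int) (out : List (List Int)) : Decidable (Spec_divco list out) := by unfold Spec_divco; infer_instance

-- ===== CLAIM (what is proved, stated in full; the proofs are below) =====
def Claim_equal_divco : Prop := ∀ (list : List Int), Dom_divco list → Spec_divco list (divco list)

-- ===== LEMMAS AND PROOFS =====

-- the chunk sizes produced by the recursive halving, as a function of the length alone
def S (n : Nat) : List Nat :=
  if n ≤ 5 then [n] else S (n / 2) ++ S (n - n / 2)
termination_by n
decreasing_by all_goals omega

-- cut xs into consecutive chunks of the given sizes
def chunksOf (xs : List Int) : List Nat → List (List Int)
  | [] => []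
  | s :: r => xs.take s :: chunksOf (xs.drop s) r

theorem S_sum (n : Nat) : (S n).sum = n := by
  induction n using S.induct with
  | case1 n h => rw [S]; simp [h]
  | case2 n h ih1 ih2 => rw [S]; simp [h, ih1, ih2]; omega

theorem chunksOf_append (a b : List Nat) (xs : List Int) :
    chunksOf xs (a ++ b) = chunksOf xs a ++ chunksOf (xs.drop a.sum) b := by
  induction a generalizing xs with
  | nil => simp [chunksOf]
  | cons s a ih =>
    simp only [List.cons_append, chunksOf, ih, List.sum_cons, List.drop_drop]

theorem chunksOf_take (sizes : List Nat) (xs : List Int) (k : Nat) (h : sizes.sum ≤ k) :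
    chunksOf (xs.take k) sizes = chunksOf xs sizes := by
  induction sizes generalizing xs k with
  | nil => simp [chunksOf]
  | cons s r ih =>
    simp only [List.sum_cons] at h
    simp only [chunksOf, List.take_take, List.drop_take]
    rw [Nat.min_eq_left (by omega), ih (xs.drop s) (k - s) (by omega)]

theorem divco_eq_chunksOf (xs : List Int) : divco xs = chunksOf xs (S xs.length) := by
  induction xs using divco.induct with
  | case1 xs h =>
    rw [divco, S]
    simp [h, chunksOf]
  | case2 xs h mid left right ih1 ih2 =>
    have h2 : PySem.Int.floordiv (xs.length : Int) 2 = ((xs.length / 2 : Nat) : Int) := by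
      exact_mod_cast PySem.Int.floordiv_natCast xs.length 2
    have eL : left = List.take (xs.length / 2) xs := by
      simp only [left, mid, h2, PySem.List.slice_to_natCast]
    have eR : right = List.drop (xs.length / 2) xs := by
      simp only [right, mid, h2, PySem.List.slice_from_natCast]
    rw [divco, S]
    simp only [if_neg h, h2, PySem.List.slice_to_natCast, PySem.List.slice_from_natCast]
    rw [eL] at ih1
    rw [eR] at ih2
    rw [ih1, ih2, chunksOf_append, S_sum]
    congr 1
    · rw [List.length_take, Nat.min_eq_left (by omega)]
      exact chunksOf_take _ _ _ (by rw [S_sum])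
    · rw [List.length_drop]

theorem sizesLoop_eq (stack acc : List Int) (hnn : ∀ n ∈ stack, 0 ≤ n) :
    sizesLoop stack acc = acc ++ stack.flatMap (fun n => (S n.toNat).map Int.ofNat) := by
  induction stack, acc using sizesLoop.induct with
  | case1 acc => simp [sizesLoop]
  | case2 acc n rest h ih =>
    have hn : 0 ≤ n := hnn n (by simp)
    rw [sizesLoop, if_pos h, ih (fun m hm => hnn m (by simp [hm]))]
    have hS : S n.toNat = [n.toNat] := by rw [S]; simp; omega
    simp [hS, Int.ofNat_toNat, hn]
  | case3 acc n rest h m ih =>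
    have hn : 0 ≤ n := hnn n (by simp)
    have h2 : PySem.Int.floordiv n 2 = n / 2 := PySem.Int.floordiv_eq_ediv_of_pos (by omega)
    have em : m = n / 2 := h2
    rw [sizesLoop, if_neg h]
    rw [ih (by
      intro k hk
      simp only [List.mem_cons] at hk
      rcases hk with rfl | rfl | hk
      · omega
      · omega
      · exact hnn k (by simp [hk]))]
    have hS : S n.toNat = S (n.toNat / 2) ++ S (n.toNat - n.toNat / 2) := by
      rw [S]; rw [if_neg (by omega)]
    have e1 : m.toNat = n.toNat / 2 := by omega
    have e2 : (n - m).toNat = n.toNat - n.toNat / 2 := by omega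
    simp only [List.flatMap_cons, hS, e1, e2, List.map_append, List.append_assoc]

theorem foldl_chunks (xs : List Int) (sizes : List Int) (hnn : ∀ s ∈ sizes, 0 ≤ s)
    (out : List (List Int)) (i : Int) (hi : 0 ≤ i) :
    (sizes.foldl
      (fun (st : List (List Int) × Int) s =>
        (st.1 ++ [PySem.List.slice xs (some st.2) (some (st.2 + s))], st.2 + s))
      (out, i)).1 = out ++ chunksOf (xs.drop i.toNat) (sizes.map Int.toNat) := by
  induction sizes generalizing out i with
  | nil => simp [chunksOf]
  | cons s r ih =>
    have hs : 0 ≤ s := hnn s (by simp)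
    simp only [List.foldl_cons, List.map_cons, chunksOf]
    rw [ih (fun m hm => hnn m (by simp [hm])) _ _ (by omega)]
    rw [PySem.List.slice_toNat xs hi (show (0:Int) ≤ i + s by omega)]
    have e1 : (i + s).toNat - i.toNat = s.toNat := by omega
    have e2 : (i + s).toNat = i.toNat + s.toNat := by omega
    simp [e2, List.drop_drop, List.append_assoc, Nat.add_comm]

theorem divco_alt_eq_chunksOf (xs : List Int) : divco_alt xs = chunksOf xs (S xs.length) := by
  unfold divco_alt
  rw [sizesLoop_eq _ _ (by simp)]
  simp only [List.flatMap_cons, List.flatMap_nil, List.append_nil, List.nil_append,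
    Int.toNat_natCast]
  rw [foldl_chunks xs _ (by intro v hv; simp only [List.mem_map] at hv; obtain ⟨a, _, rfl⟩ := hv; exact Int.natCast_nonneg a) [] 0 le_rfl]
  simp only [List.nil_append, Int.toNat_zero, List.drop_zero]
  have hmap : (List.map Int.ofNat (S xs.length)).map Int.toNat = S xs.length := by
    simp [List.map_map, Function.comp_def]
  rw [hmap]

-- ===== VERDICT (by name: the statement is the Claim_ definition above) =====
theorem divco_spec : Claim_equal_divco := by
  intro list _
  unfold Spec_divco
  rw [divco_eq_chunksOf, divco_alt_eq_chunksOf]
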